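-- pv_equiv track=rewrite | github.com/Kryvtsov15/Tests-db2 | handle_string.py | handle_string
-- ===== SOURCE A (Python) =====
-- def handle_string(value):
--     symbols = ['!','@','#','$','%',',','.','?']
--     for symbol in symbols:
--         if symbol in value:
--             value = value.replace(symbol,'')
--     value = value.replace(' ', '')
--     num = [int(i) for i in value if i.isdigit()]
--     count_numbers = len(num)
--     count_letters = len(value) - count_numbers
--     result = ("Letters - {} \nDigits - {}".format(count_letters, count_numbers))
--     return result
-- ===== SOURCE B (Python) =====
-- def handle_string(value):
--     skip = {'!', '@', '#', '$', '%', ',', '.', '?', ' '}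
--     letters = 0
--     digits = 0
--     for ch in value:
--         if ch in skip:
--             continue
--         if ch.isdigit():
--             digits += 1
--         else:
--             letters += 1
--     return "Letters - {} \nDigits - {}".format(letters, digits)
-- ===== Notes on version B (the rewrite author's own statement) =====
-- stated objective: simpler
-- what changed: Replaces the eight conditional replace() passes plus a comprehension pass with a single traversal of the original string maintaining two counters and an O(1) skip-set membership test.
import Mathlib
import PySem

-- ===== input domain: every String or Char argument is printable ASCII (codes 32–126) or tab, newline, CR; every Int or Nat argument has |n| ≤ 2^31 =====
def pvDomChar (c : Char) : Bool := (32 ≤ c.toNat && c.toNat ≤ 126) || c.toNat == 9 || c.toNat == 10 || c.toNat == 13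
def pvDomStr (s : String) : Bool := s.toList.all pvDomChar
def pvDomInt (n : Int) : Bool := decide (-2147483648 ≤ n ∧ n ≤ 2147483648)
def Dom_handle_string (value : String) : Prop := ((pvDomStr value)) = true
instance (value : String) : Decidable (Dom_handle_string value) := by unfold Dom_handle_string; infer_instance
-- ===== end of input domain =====

-- B replaces A's eight conditional replace() passes and a comprehension pass by one
-- traversal of the original string maintaining two counters (objective: simpler).


-- ===== PORT A =====
-- int(i) is ported as (PySem.Int.ofChars? [i]).getD 0: on Dom every isdigit char is
-- one of '0'..'9', where ofChars? succeeds, so the port is exact there.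
def handle_string (value : String) : String :=
  let symbols : List String := ["!", "@", "#", "$", "%", ",", ".", "?"]
  let value := symbols.foldl
    (fun v symbol => if PySem.Str.isIn symbol v then PySem.Str.replace v symbol "" else v) value
  let value := PySem.Str.replace value " " ""
  let num := (value.toList.filter PySem.Chars.isdigit).map (fun i => (PySem.Int.ofChars? [i]).getD 0)
  let count_numbers : Int := num.length
  let count_letters : Int := (PySem.Str.len value : Int) - count_numbers
  "Letters - " ++ PySem.Int.toStr count_letters ++ " \nDigits - " ++ PySem.Int.toStr count_numbers

-- ===== PORT B =====
def handle_string_alt (value : String) : String :=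
  let skip : List Char := ['!', '@', '#', '$', '%', ',', '.', '?', ' ']
  let counts := value.toList.foldl
    (fun (acc : Int × Int) ch =>
      if ch ∈ skip then acc
      else if PySem.Chars.isdigit ch then (acc.1, acc.2 + 1)
      else (acc.1 + 1, acc.2)) (0, 0)
  "Letters - " ++ PySem.Int.toStr counts.1 ++ " \nDigits - " ++ PySem.Int.toStr counts.2

-- ===== PRECONDITION & SPEC =====
def Spec_handle_string (value : String) (out : String) : Prop := out = handle_string_alt value
instance (value : String) (out : String) : Decidable (Spec_handle_string value out) := by unfold Spec_handle_string; infer_instance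

-- ===== CLAIM (what is proved, stated in full; the proofs are below) =====
def Claim_equal_handle_string : Prop := ∀ (value : String), Dom_handle_string value → Spec_handle_string value (handle_string value)

-- ===== LEMMAS AND PROOFS =====

-- replacing a single character by the empty string is filtering it out
theorem replace_go_single (c : Char) : ∀ (l acc : List Char) (fuel : Nat), l.length ≤ fuel →
    PySem.Chars.replace.go [c] [] fuel l acc = acc.reverse ++ l.filter (· ≠ c) := by
  intro l
  induction l with
  | nil =>
    intro acc fuel _
    cases fuel <;> simp [PySem.Chars.replace.go]
  | cons x t ih =>
    intro acc fuel hf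
    cases fuel with
    | zero => simp at hf
    | succ f =>
      by_cases hx : x = c
      · subst hx
        simp only [PySem.Chars.replace.go, List.isPrefixOf, BEq.rfl, Bool.true_and,
          if_pos]
        simp only [List.length_cons, List.length_nil, Nat.zero_add, List.drop_succ_cons,
          List.drop_zero, List.reverse_nil, List.nil_append]
        rw [ih acc f (by simpa using hf)]
        simp
      · simp only [PySem.Chars.replace.go]
        rw [if_neg (by simp [List.isPrefixOf]; intro h; exact absurd h.symm hx)]
        rw [ih (x :: acc) f (by simpa using hf)]
        simp [hx]

theorem replace_single (c : Char) (l : List Char) :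
    PySem.Chars.replace l [c] [] = l.filter (· ≠ c) := by
  simp only [PySem.Chars.replace, List.isEmpty_cons]
  simpa using replace_go_single c l [] l.length le_rfl

-- one step of A's replace loop filters one character out of the string
theorem stepA (v : String) (s : String) (c : Char) (hs : s.toList = [c]) :
    (if PySem.Str.isIn s v then PySem.Str.replace v s "" else v).toList
      = v.toList.filter (· ≠ c) := by
  by_cases h : PySem.Str.isIn s v
  · rw [if_pos h]
    simp [PySem.Str.replace, hs, replace_single]
  · rw [if_neg h]
    have hmem : c ∉ v.toList := by
      have : ¬ s.toList <:+: v.toList := by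
        intro hinf
        exact h ((PySem.Str.isIn_iff_infix s v).mpr hinf)
      rw [hs] at this
      intro hc
      exact this ((List.singleton_infix_iff c v.toList).mpr hc)
    symm
    exact List.filter_eq_self.mpr (fun a ha => by
      simp only [decide_eq_true_eq, ne_eq]
      intro rfl'; exact hmem (rfl' ▸ ha))

-- B's fold computes the two counts
theorem foldB (skip : List Char) (l : List Char) : ∀ (a b : Int),
    l.foldl (fun (acc : Int × Int) ch =>
      if ch ∈ skip then acc
      else if PySem.Chars.isdigit ch then (acc.1, acc.2 + 1)
      else (acc.1 + 1, acc.2)) (a, b)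
    = (a + l.countP (fun ch => ch ∉ skip ∧ ¬ PySem.Chars.isdigit ch),
       b + l.countP (fun ch => ch ∉ skip ∧ PySem.Chars.isdigit ch)) := by
  induction l with
  | nil => intro a b; simp
  | cons x t ih =>
    intro a b
    simp only [List.foldl_cons, List.countP_cons]
    by_cases hx : x ∈ skip
    · rw [if_pos hx, ih]
      simp [hx]
    · rw [if_neg hx]
      by_cases hd : PySem.Chars.isdigit x
      · rw [if_pos hd, ih]
        simp [hx, hd]
        omega
      · rw [if_neg hd, ih]
        simp [hx, hd]
        omega

theorem countP_split (p d : Char → Bool) (l : List Char) :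
    l.countP (fun c => p c && d c) + l.countP (fun c => p c && !d c) = l.countP p := by
  induction l with
  | nil => simp
  | cons x t ih =>
    simp only [List.countP_cons]
    by_cases hp : p x <;> by_cases hd : d x <;> simp [hp, hd] <;> omega

-- A's symbol loop, over any list of single-character symbols, filters those characters out
theorem foldA (syms : List Char) : ∀ (v : String),
    ((syms.map (fun c => String.ofList [c])).foldl
      (fun v symbol => if PySem.Str.isIn symbol v then PySem.Str.replace v symbol "" else v) v).toList
    = v.toList.filter (fun c => c ∉ syms) := by
  induction syms with
  | nil => intro v; simp
  | cons x t ih =>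
    intro v
    simp only [List.map_cons, List.foldl_cons]
    rw [ih, stepA v (String.ofList [x]) x String.toList_ofList]
    rw [List.filter_filter]
    apply List.filter_congr
    intro a _
    by_cases hax : a = x <;> simp [hax]

-- ===== VERDICT (by name: the statement is the Claim_ definition above) =====
theorem handle_string_spec : Claim_equal_handle_string := by
  intro value _
  unfold Spec_handle_string
  simp only [handle_string, handle_string_alt]
  set d := value.toList with hd
  set skip : List Char := ['!', '@', '#', '$', '%', ',', '.', '?', ' '] with hskip
  have hsyms : (["!", "@", "#", "$", "%", ",", ".", "?"] : List String)
      = (['!', '@', '#', '$', '%', ',', '.', '?'] : List Char).map (fun c => String.ofList [c]) := rfl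
  have hfold : ((["!", "@", "#", "$", "%", ",", ".", "?"] : List String).foldl
      (fun v symbol => if PySem.Str.isIn symbol v then PySem.Str.replace v symbol "" else v) value).toList
      = d.filter (fun c => c ∉ (['!', '@', '#', '$', '%', ',', '.', '?'] : List Char)) := by
    rw [hsyms]; exact foldA _ value
  have h2 : (PySem.Str.replace ((["!", "@", "#", "$", "%", ",", ".", "?"] : List String).foldl
      (fun v symbol => if PySem.Str.isIn symbol v then PySem.Str.replace v symbol "" else v) value) " " "").toList
      = d.filter (fun c => c ∉ skip) := by
    rw [PySem.Str.toList_replace]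
    rw [show (" " : String).toList = [' '] from rfl, show ("" : String).toList = [] from rfl]
    rw [hfold, replace_single, List.filter_filter]
    apply List.filter_congr
    intro a _
    by_cases hsp : a = ' '
    · subst hsp; simp [hskip]
    · by_cases h1 : a ∈ (['!', '@', '#', '$', '%', ',', '.', '?'] : List Char)
      · simp only [List.mem_cons, List.not_mem_nil, or_false] at h1
        rcases h1 with rfl | rfl | rfl | rfl | rfl | rfl | rfl | rfl <;> simp [hskip]
      · simp only [List.mem_cons, List.not_mem_nil, or_false, not_or] at h1
        obtain ⟨n1, n2, n3, n4, n5, n6, n7, n8⟩ := h1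
        simp [hskip, n1, n2, n3, n4, n5, n6, n7, n8, hsp]
  rw [foldB]
  simp only [PySem.Str.len_eq, h2, List.length_map]
  have hlen : (d.filter (fun c => c ∉ skip)).length = d.countP (fun c => c ∉ skip) :=
    List.countP_eq_length_filter.symm
  have hdig : (List.filter PySem.Chars.isdigit (d.filter (fun c => c ∉ skip))).length
      = d.countP (fun ch => ch ∉ skip ∧ PySem.Chars.isdigit ch) := by
    rw [← List.countP_eq_length_filter, List.countP_filter]
    apply List.countP_congr
    intro a _
    by_cases h1 : a ∈ skip <;> by_cases h3 : PySem.Chars.isdigit a <;> simp [h1, h3]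
  have hlet : (d.countP (fun c => c ∉ skip) : Int)
        - d.countP (fun ch => ch ∉ skip ∧ PySem.Chars.isdigit ch)
      = 0 + (d.countP (fun ch => ch ∉ skip ∧ ¬ PySem.Chars.isdigit ch) : Int) := by
    have hsplit := countP_split (fun c => decide (c ∉ skip)) PySem.Chars.isdigit d
    have e1 : d.countP (fun c => decide (c ∉ skip) && PySem.Chars.isdigit c)
        = d.countP (fun ch => ch ∉ skip ∧ PySem.Chars.isdigit ch) := by
      apply List.countP_congr; intro a _
      by_cases h1 : a ∈ skip <;> by_cases h3 : PySem.Chars.isdigit a <;> simp [h1, h3]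
    have e2 : d.countP (fun c => decide (c ∉ skip) && !PySem.Chars.isdigit c)
        = d.countP (fun ch => ch ∉ skip ∧ ¬ PySem.Chars.isdigit ch) := by
      apply List.countP_congr; intro a _
      by_cases h1 : a ∈ skip <;> by_cases h3 : PySem.Chars.isdigit a <;> simp [h1, h3]
    rw [e1, e2] at hsplit
    omega
  rw [hdig, hlen, hlet]
  norm_num
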